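-- pv_equiv track=rewrite | github.com/BboyZander/CodeWars | [6kyu]/[6kyu] bowlingPins.py | bowlingPins
-- ===== SOURCE A (Python) =====
-- def bowlingPins(arr):
--     result = ""
--     line = [[],[],[],[]]
--     for x in range(7,11):
--         line[0].append(" ") if x in arr else line[0].append("I")
--     result = " ".join(line[0]) + "\n"
--
--     for x in range(4,7):
--         line[1].append(" ") if x in arr else line[1].append("I")
--     result += " " + " ".join(line[1]) + " \n"
--
--     for x in range(2,4):
--         line[2].append(" ") if x in arr else line[2].append("I")
--     result += "  " + " ".join(line[2]) + "  \n"
--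
--     line[3].append(" ") if 1 in arr else line[3].append("I")
--     result += "   " + " ".join(line[3]) + "   "
--     return result
-- ===== SOURCE B (Python) =====
-- def bowlingPins(arr):
--     # Start from a full-rack template and blank out each knocked pin's character.
--     template = list("I I I I\n I I I \n  I I  \n   I   ")
--     pos = {7: 0, 8: 2, 9: 4, 10: 6, 4: 9, 5: 11, 6: 13, 2: 18, 3: 20, 1: 27}
--     for p in arr:
--         if p in pos:
--             template[pos[p]] = ' '
--     return ''.join(template)
-- ===== Notes on version B (the rewrite author's own statement) =====
-- stated objective: alternative
-- what changed: Instead of rendering the diagram pin-by-pin with a membership test per pin (10 scans of arr), B starts from a fixed full-rack template string and a pin->position dict, and makes one pass over arr blanking each knocked pin's character.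
import Mathlib
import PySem

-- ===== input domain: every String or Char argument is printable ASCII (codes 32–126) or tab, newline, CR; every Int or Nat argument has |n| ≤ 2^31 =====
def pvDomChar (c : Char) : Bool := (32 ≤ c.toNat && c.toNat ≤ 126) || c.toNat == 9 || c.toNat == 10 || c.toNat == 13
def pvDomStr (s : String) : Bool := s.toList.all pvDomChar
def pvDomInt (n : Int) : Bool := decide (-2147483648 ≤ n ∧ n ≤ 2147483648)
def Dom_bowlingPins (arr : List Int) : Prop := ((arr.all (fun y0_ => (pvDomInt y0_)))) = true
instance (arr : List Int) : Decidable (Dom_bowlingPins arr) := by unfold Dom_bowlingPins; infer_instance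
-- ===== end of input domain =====

-- B replaces A's per-pin membership rendering by the inverse algorithm: start from a
-- full-rack template string and blank out the character position of each knocked pin in arr (simpler).

-- ===== PORT A =====
def bowlingPins (arr : List Int) : String :=
  let line0 : List String :=
    (PySem.List.pyRange 7 11 1).foldl (fun l x => if arr.contains x then l ++ [" "] else l ++ ["I"]) []
  let result := PySem.Str.join " " line0 ++ "\n"
  let line1 : List String :=
    (PySem.List.pyRange 4 7 1).foldl (fun l x => if arr.contains x then l ++ [" "] else l ++ ["I"]) []
  let result := result ++ " " ++ PySem.Str.join " " line1 ++ " \n"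
  let line2 : List String :=
    (PySem.List.pyRange 2 4 1).foldl (fun l x => if arr.contains x then l ++ [" "] else l ++ ["I"]) []
  let result := result ++ "  " ++ PySem.Str.join " " line2 ++ "  \n"
  let line3 : List String := if arr.contains 1 then [" "] else ["I"]
  result ++ "   " ++ PySem.Str.join " " line3 ++ "   "

-- ===== PORT B =====
-- the dict {7:0, 8:2, …}: values are list indices (all nonnegative literals), stored as Nat — exact
def pvPinPos : PySem.Dict Int Nat :=
  PySem.Dict.mk [(7, 0), (8, 2), (9, 4), (10, 6), (4, 9), (5, 11), (6, 13), (2, 18), (3, 20), (1, 27)]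

-- 'if p in pos: template[pos[p]] = " "' — the guarded lookup+assignment, as a match on get?
def pvBlank (t : List Char) (p : Int) : List Char :=
  match pvPinPos.get? p with
  | some i => t.set i ' '
  | none => t

def bowlingPins_alt (arr : List Int) : String :=
  let template := "I I I I\n I I I \n  I I  \n   I   ".toList
  String.ofList (arr.foldl pvBlank template)

-- ===== PRECONDITION & SPEC =====
def Spec_bowlingPins (arr : List Int) (out : String) : Prop := out = bowlingPins_alt arr
instance (arr : List Int) (out : String) : Decidable (Spec_bowlingPins arr out) := by unfold Spec_bowlingPins; infer_instance

-- ===== CLAIM (what is proved, stated in full; the proofs are below) =====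
def Claim_equal_bowlingPins : Prop := ∀ (arr : List Int), Dom_bowlingPins arr → Spec_bowlingPins arr (bowlingPins arr)

-- ===== LEMMAS AND PROOFS =====

-- the graph of pvPinPos, as a literal list
def pvEntries : List (Int × Nat) :=
  [(7, 0), (8, 2), (9, 4), (10, 6), (4, 9), (5, 11), (6, 13), (2, 18), (3, 20), (1, 27)]

theorem pv_get?_mem (p : Int) (j : Nat) (h : pvPinPos.get? p = some j) : (p, j) ∈ pvEntries := by
  simp only [pvPinPos, PySem.Dict.get?_mk_cons] at h
  split_ifs at h <;> simp_all [pvEntries, PySem.Dict.get?]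

theorem pv_mem_get? : ∀ pr ∈ pvEntries, pvPinPos.get? pr.1 = some pr.2 := by decide

theorem pv_ex_char (arr : List Int) (j : Nat) :
    (∃ p ∈ arr, pvPinPos.get? p = some j) ↔ ∃ pr ∈ pvEntries, pr.2 = j ∧ pr.1 ∈ arr := by
  constructor
  · rintro ⟨p, hp, h⟩
    exact ⟨(p, j), pv_get?_mem p j h, rfl, hp⟩
  · rintro ⟨pr, hmem, hj, hp⟩
    exact ⟨pr.1, hp, hj ▸ pv_mem_get? pr hmem⟩

theorem pv_str_toList_sp : (" " : String).toList = [' '] := rfl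
theorem pv_str_toList_I : ("I" : String).toList = ['I'] := rfl

theorem pv_ite_singleton_append {α : Type} (c : Prop) [Decidable c] (a b : α) (r : List α) :
    (if c then [a] else [b]) ++ r = (if c then a else b) :: r := by
  split <;> rfl

-- A's per-row append loop builds exactly the mapped list of cell strings
theorem row_fold (arr : List Int) (xs : List Int) :
    xs.foldl (fun l x => if arr.contains x then l ++ [(" " : String)] else l ++ ["I"]) [] =
    xs.map (fun x => if arr.contains x then " " else "I") := by
  rw [PySem.List.foldl_congr_mem (g := fun l x => l ++ [if arr.contains x then (" " : String) else "I"])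
      (h := by intro acc x hx; by_cases h : x ∈ arr <;> simp [h])]
  simpa using PySem.List.foldl_append_singleton_eq_map
    (f := fun x => if arr.contains x then (" " : String) else "I") (l := xs) (acc := [])

-- pointwise characterisation of B's blanking loop
theorem pv_fold_get? (arr : List Int) : ∀ (t : List Char) (j : Nat),
    (arr.foldl pvBlank t)[j]? =
      if (∃ p ∈ arr, pvPinPos.get? p = some j) ∧ j < t.length then some ' ' else t[j]? := by
  induction arr with
  | nil => intro t j; simp
  | cons a l ih =>
    intro t j
    rw [List.foldl_cons, ih]
    have hlen : (pvBlank t a).length = t.length := by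
      unfold pvBlank; cases pvPinPos.get? a <;> simp
    rw [hlen]
    by_cases hj : j < t.length
    · by_cases hl : ∃ p ∈ l, pvPinPos.get? p = some j
      · have : ∃ p ∈ a :: l, pvPinPos.get? p = some j := by
          obtain ⟨p, hp, h⟩ := hl; exact ⟨p, List.mem_cons_of_mem _ hp, h⟩
        simp [hl, hj]
      · rcases hA : pvPinPos.get? a with _ | i
        · have hcond : ¬ ∃ p ∈ a :: l, pvPinPos.get? p = some j := by
            rintro ⟨p, hp, h⟩
            rcases List.mem_cons.mp hp with rfl | hp'
            · simp [hA] at h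
            · exact hl ⟨p, hp', h⟩
          simp [hl, pvBlank, hA]
        · by_cases hij : i = j
          · subst hij
            have hcond : ∃ p ∈ a :: l, pvPinPos.get? p = some i :=
              ⟨a, List.mem_cons_self, hA⟩
            simp [hl, hj, pvBlank, hA]
          · have hcond : ¬ ∃ p ∈ a :: l, pvPinPos.get? p = some j := by
              rintro ⟨p, hp, h⟩
              rcases List.mem_cons.mp hp with rfl | hp'
              · rw [hA] at h; exact hij (by injection h)
              · exact hl ⟨p, hp', h⟩
            simp [hl, pvBlank, hA, hij]
    · simp only [hj, and_false, if_false]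
      unfold pvBlank
      rcases hA : pvPinPos.get? a with _ | i
      · rfl
      · rw [List.getElem?_set]
        split_ifs with h1 h2
        · exact absurd (h1 ▸ h2) hj
        · exact (List.getElem?_eq_none (by omega)).symm
        · rfl

-- the common normal form: the 31 characters of the diagram
def pvMid (arr : List Int) : List Char :=
  [if arr.contains 7 then ' ' else 'I', ' ', if arr.contains 8 then ' ' else 'I', ' ',
   if arr.contains 9 then ' ' else 'I', ' ', if arr.contains 10 then ' ' else 'I', '\n',
   ' ', if arr.contains 4 then ' ' else 'I', ' ', if arr.contains 5 then ' ' else 'I', ' ',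
   if arr.contains 6 then ' ' else 'I', ' ', '\n',
   ' ', ' ', if arr.contains 2 then ' ' else 'I', ' ', if arr.contains 3 then ' ' else 'I',
   ' ', ' ', '\n',
   ' ', ' ', ' ', if arr.contains 1 then ' ' else 'I', ' ', ' ', ' ']

theorem pv_B_eq_mid (arr : List Int) :
    arr.foldl pvBlank ("I I I I\n I I I \n  I I  \n   I   ".toList) = pvMid arr := by
  apply List.ext_getElem?
  intro j
  rw [pv_fold_get?]
  simp only [pv_ex_char]
  by_cases hj : j < 31
  · interval_cases j <;> simp [pvEntries, pvMid, apply_ite]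
  · have h1 : ("I I I I\n I I I \n  I I  \n   I   ".toList)[j]? = none :=
      List.getElem?_eq_none (by simp; omega)
    have h2 : (pvMid arr)[j]? = none :=
      List.getElem?_eq_none (by simp [pvMid]; omega)
    rw [if_neg (fun h => hj (by simpa using h.2)), h1, h2]

-- ===== VERDICT (by name: the statement is the Claim_ definition above) =====
theorem bowlingPins_spec : Claim_equal_bowlingPins := by
  intro arr _
  show bowlingPins arr = bowlingPins_alt arr
  unfold bowlingPins bowlingPins_alt
  rw [row_fold, row_fold, row_fold]
  have e7 : PySem.List.pyRange 7 11 1 = [7, 8, 9, 10] := by decide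
  have e4 : PySem.List.pyRange 4 7 1 = [4, 5, 6] := by decide
  have e2 : PySem.List.pyRange 2 4 1 = [2, 3] := by decide
  simp only [e7, e4, e2, List.map]
  rw [pv_B_eq_mid]
  apply String.toList_inj.mp
  simp [PySem.Str.toList_join, PySem.Chars.join, List.intercalate, List.intersperse, pvMid]
  simp only [apply_ite String.toList, apply_ite (List.map String.toList),
    apply_ite (List.intersperse [' ']), apply_ite List.flatten, pv_str_toList_sp, pv_str_toList_I]
  simp only [List.map, List.intersperse, List.flatten]
  simp only [pv_ite_singleton_append]
  by_cases h1 : (1 : Int) ∈ arr <;> simp [h1]
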